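-- pv_equiv track=rewrite | github.com/GanonthaBr/Robustness-of-RAG-systems-for-low-resources-langues | scripts/run_robustness_multiseed.py | _translation_artifact_text
-- ===== SOURCE A (Python) =====
-- def _translation_artifact_text(text):
--     # Deterministic, lightweight synthetic corruption.
--     repl = {
--         "a": "", "e": "", "i": "", "o": "", "u": "",
--         "A": "", "E": "", "I": "", "O": "", "U": "",
--     }
--     out = []
--     for i, ch in enumerate(text):
--         if i % 17 == 0 and ch.isalpha():
--             continue
--         out.append(repl.get(ch, ch))
--     return "".join(out).strip() or text
-- ===== SOURCE B (Python) =====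
-- def _translation_artifact_text(text):
--     # Chunked traversal: every 17-char block starts at a "drop" index, so no
--     # per-character index arithmetic is needed: drop the block's head if it is
--     # alphabetic (a non-alpha head is never a vowel, so it is kept as-is) and
--     # strip vowels only from the block's tail.
--     VOWELS = set("aeiouAEIOU")
--     pieces = []
--     for start in range(0, len(text), 17):
--         block = text[start:start + 17]
--         if not block[0].isalpha():
--             pieces.append(block[0])
--         pieces.append("".join(c for c in block[1:] if c not in VOWELS))
--     corrupted = "".join(pieces).strip()
--     return corrupted or text
-- ===== Notes on version B (the rewrite author's own statement) =====
-- stated objective: alternative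
-- what changed: Replaces A's single per-character loop with an i%17 index test and a vowel-to-empty dict lookup by a chunked traversal: the text is cut into 17-char blocks, each block's head (a drop position by construction) is kept only when non-alphabetic, and vowels are set-filtered from the block tail only, so no per-character index arithmetic or dict lookup remains.
import Mathlib
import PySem

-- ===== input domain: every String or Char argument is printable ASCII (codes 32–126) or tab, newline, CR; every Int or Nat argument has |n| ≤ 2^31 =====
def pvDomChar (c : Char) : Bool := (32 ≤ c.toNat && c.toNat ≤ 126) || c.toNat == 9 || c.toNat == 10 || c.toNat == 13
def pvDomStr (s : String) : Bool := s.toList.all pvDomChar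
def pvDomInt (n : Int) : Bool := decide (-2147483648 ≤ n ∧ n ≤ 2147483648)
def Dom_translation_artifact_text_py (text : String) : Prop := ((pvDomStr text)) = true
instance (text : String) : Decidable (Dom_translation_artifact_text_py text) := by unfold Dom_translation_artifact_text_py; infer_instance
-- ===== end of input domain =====

-- B replaces A's per-character indexed loop (i%17 test + vowel dict lookup) by a chunked
-- traversal over 17-char blocks: drop an alphabetic block head, set-filter vowels from the tail.

-- ===== PORT A =====
def pvReplA : PySem.Dict Char (List Char) :=
  PySem.Dict.mk
  [('a', []), ('e', []), ('i', []), ('o', []), ('u', []),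
   ('A', []), ('E', []), ('I', []), ('O', []), ('U', [])]

def translation_artifact_text_py (text : String) : String :=
  let out : List (List Char) :=
    (PySem.List.enumerate text.toList 0).foldl
      (fun acc p =>
        if PySem.Int.mod p.1 17 == 0 && PySem.Chars.isalpha p.2 then acc
        else acc ++ [PySem.Dict.getD pvReplA p.2 [p.2]]) []
  let stripped := PySem.Chars.strip (PySem.Chars.join [] out)
  if stripped.isEmpty then text else String.ofList stripped

-- ===== PORT B =====
def pvVowelSet : PySem.Set Char := PySem.Set.ofList "aeiouAEIOU".toList

-- the 'for start in range(0, len(text), 17)' loop: structural recursion over 17-char blocks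
def pvAltGo (cs : List Char) : List (List Char) :=
  match cs with
  | [] => []
  | c :: rest =>
      (if !PySem.Chars.isalpha c then [[c]] else []) ++
      [(rest.take 16).filter (fun d => !PySem.Set.contains pvVowelSet d)] ++
      pvAltGo (rest.drop 16)
termination_by cs.length
decreasing_by simp

def translation_artifact_text_py_alt (text : String) : String :=
  let pieces := pvAltGo text.toList
  let corrupted := PySem.Chars.strip (PySem.Chars.join [] pieces)
  if corrupted.isEmpty then text else String.ofList corrupted

-- ===== PRECONDITION & SPEC =====
def Spec_translation_artifact_text_py (text : String) (out : String) : Prop := out = translation_artifact_text_py_alt text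
instance (text : String) (out : String) : Decidable (Spec_translation_artifact_text_py text out) := by unfold Spec_translation_artifact_text_py; infer_instance

-- ===== CLAIM (what is proved, stated in full; the proofs are below) =====
def Claim_equal_translation_artifact_text_py : Prop := ∀ (text : String), Dom_translation_artifact_text_py text → Spec_translation_artifact_text_py text (translation_artifact_text_py text)

-- ===== LEMMAS AND PROOFS =====

lemma vowelSet_eq : pvVowelSet = "aeiouAEIOU".toList := by decide

lemma getD_repl (c : Char) :
    PySem.Dict.getD pvReplA c [c]
    = if PySem.Set.contains pvVowelSet c then [] else [c] := by
  rw [vowelSet_eq]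
  simp only [pvReplA, PySem.Dict.getD, PySem.Dict.get?, PySem.Set.contains_eq_listContains]
  by_cases h1 : c = 'a'; · subst h1; rfl
  by_cases h2 : c = 'e'; · subst h2; rfl
  by_cases h3 : c = 'i'; · subst h3; rfl
  by_cases h4 : c = 'o'; · subst h4; rfl
  by_cases h5 : c = 'u'; · subst h5; rfl
  by_cases h6 : c = 'A'; · subst h6; rfl
  by_cases h7 : c = 'E'; · subst h7; rfl
  by_cases h8 : c = 'I'; · subst h8; rfl
  by_cases h9 : c = 'O'; · subst h9; rfl
  by_cases h10 : c = 'U'; · subst h10; rfl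
  have e1 : ('a' == c) = false := beq_eq_false_iff_ne.mpr (fun h => h1 h.symm)
  have f1 : (c == 'a') = false := beq_eq_false_iff_ne.mpr h1
  have e2 : ('e' == c) = false := beq_eq_false_iff_ne.mpr (fun h => h2 h.symm)
  have f2 : (c == 'e') = false := beq_eq_false_iff_ne.mpr h2
  have e3 : ('i' == c) = false := beq_eq_false_iff_ne.mpr (fun h => h3 h.symm)
  have f3 : (c == 'i') = false := beq_eq_false_iff_ne.mpr h3
  have e4 : ('o' == c) = false := beq_eq_false_iff_ne.mpr (fun h => h4 h.symm)
  have f4 : (c == 'o') = false := beq_eq_false_iff_ne.mpr h4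
  have e5 : ('u' == c) = false := beq_eq_false_iff_ne.mpr (fun h => h5 h.symm)
  have f5 : (c == 'u') = false := beq_eq_false_iff_ne.mpr h5
  have e6 : ('A' == c) = false := beq_eq_false_iff_ne.mpr (fun h => h6 h.symm)
  have f6 : (c == 'A') = false := beq_eq_false_iff_ne.mpr h6
  have e7 : ('E' == c) = false := beq_eq_false_iff_ne.mpr (fun h => h7 h.symm)
  have f7 : (c == 'E') = false := beq_eq_false_iff_ne.mpr h7
  have e8 : ('I' == c) = false := beq_eq_false_iff_ne.mpr (fun h => h8 h.symm)
  have f8 : (c == 'I') = false := beq_eq_false_iff_ne.mpr h8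
  have e9 : ('O' == c) = false := beq_eq_false_iff_ne.mpr (fun h => h9 h.symm)
  have f9 : (c == 'O') = false := beq_eq_false_iff_ne.mpr h9
  have e10 : ('U' == c) = false := beq_eq_false_iff_ne.mpr (fun h => h10 h.symm)
  have f10 : (c == 'U') = false := beq_eq_false_iff_ne.mpr h10
  simp only [List.find?, e1,e2,e3,e4,e5,e6,e7,e8,e9,e10]
  simp [List.elem, f1,f2,f3,f4,f5,f6,f7,f8,f9,f10,
    h1,h2,h3,h4,h5,h6,h7,h8,h9,h10]

lemma foldl_skip_append (ps : List (Int × Char)) (acc : List (List Char)) :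
    ps.foldl
      (fun acc p =>
        if PySem.Int.mod p.1 17 == 0 && PySem.Chars.isalpha p.2 then acc
        else acc ++ [PySem.Dict.getD pvReplA p.2 [p.2]]) acc
    = acc ++ (ps.filter
        (fun p => !(PySem.Int.mod p.1 17 == 0 && PySem.Chars.isalpha p.2))).map
        (fun p => PySem.Dict.getD pvReplA p.2 [p.2]) := by
  induction ps generalizing acc with
  | nil => simp
  | cons p ps ih =>
    cases h : (PySem.Int.mod p.1 17 == 0 && PySem.Chars.isalpha p.2) <;>
      simp only [List.foldl_cons, List.filter_cons, h, Bool.not_false, Bool.not_true, ih] <;> simp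

lemma intercalate_nil_left (l : List (List Char)) : List.intercalate [] l = l.flatten := by
  induction l with
  | nil => rfl
  | cons x xs ih =>
    cases xs with
    | nil => simp [List.intercalate]
    | cons y ys =>
      simp only [List.intercalate, List.intersperse] at *
      simp_all [List.flatten]

lemma flatten_map_repl (cs : List Char) :
    (cs.map (fun c => PySem.Dict.getD pvReplA c [c])).flatten
    = cs.filter (fun c => !PySem.Set.contains pvVowelSet c) := by
  induction cs with
  | nil => simp
  | cons c cs ih =>
    rw [List.map_cons, List.flatten_cons, ih, List.filter_cons, getD_repl]
    by_cases h : PySem.Set.contains pvVowelSet c = true <;> simp_all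

lemma flatten_map_repl_pairs (L : List (Int × Char)) :
    (L.map (fun p => PySem.Dict.getD pvReplA p.2 [p.2])).flatten
    = (L.map (fun p => p.2)).filter (fun c => !PySem.Set.contains pvVowelSet c) := by
  rw [← flatten_map_repl, List.map_map]; rfl

lemma not_alpha_not_vowel (c : Char) (h : PySem.Chars.isalpha c = false) :
    PySem.Set.contains pvVowelSet c = false := by
  cases hc : PySem.Set.contains pvVowelSet c
  · rfl
  · exfalso
    have hm : c ∈ pvVowelSet := (PySem.Set.contains_iff _ _).mp hc
    rw [vowelSet_eq,
      show "aeiouAEIOU".toList = ['a','e','i','o','u','A','E','I','O','U'] from by decide] at hm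
    simp only [List.mem_cons, List.not_mem_nil, or_false] at hm
    rcases hm with rfl|rfl|rfl|rfl|rfl|rfl|rfl|rfl|rfl|rfl <;> exact absurd h (by decide)

lemma chunk_eq (cs : List Char) :
    ∀ (m : Nat),
    ((((PySem.List.enumerate cs (17 * (m : Int))).filter
        (fun p => !(PySem.Int.mod p.1 17 == 0 && PySem.Chars.isalpha p.2))).map (fun p => p.2)).filter
        (fun c => !PySem.Set.contains pvVowelSet c))
    = (pvAltGo cs).flatten := by
  induction cs using pvAltGo.induct with
  | case1 => intro m; simp [pvAltGo, PySem.List.enumerate]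
  | case2 c rest ih =>
    intro m
    have hmod : PySem.Int.mod (17 * (m : Int)) 17 = 0 := by
      rw [PySem.Int.mod_eq_emod_of_pos (by norm_num)]; omega
    rw [pvAltGo]
    conv_lhs => rw [show rest = rest.take 16 ++ rest.drop 16 from (List.take_append_drop 16 rest).symm]
    rw [PySem.List.enumerate_cons, PySem.List.enumerate_append,
      List.filter_cons]
    have hkeep : (PySem.List.enumerate (rest.take 16) (17 * (m : Int) + 1)).filter
        (fun p => !(PySem.Int.mod p.1 17 == 0 && PySem.Chars.isalpha p.2))
        = PySem.List.enumerate (rest.take 16) (17 * (m : Int) + 1) := by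
      apply List.filter_eq_self.mpr
      intro p hp
      rcases (PySem.List.mem_enumerate_iff _ _ _).mp hp with ⟨k, hk, rfl⟩
      have hk16 : k < 16 := lt_of_lt_of_le hk (by simp)
      have : PySem.Int.mod (17 * (m : Int) + 1 + (k : Int)) 17 ≠ 0 := by
        rw [PySem.Int.mod_eq_emod_of_pos (by norm_num)]; omega
      simp [this]
      exact Or.inl (by omega)
    have hdrop : ((((PySem.List.enumerate (rest.drop 16)
            (17 * (m : Int) + 1 + ((rest.take 16).length : Int))).filter
        (fun p => !(PySem.Int.mod p.1 17 == 0 && PySem.Chars.isalpha p.2))).map (fun p => p.2)).filter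
        (fun c => !PySem.Set.contains pvVowelSet c))
        = (pvAltGo (rest.drop 16)).flatten := by
      by_cases hlen : 16 ≤ rest.length
      · have hofs : (17 * (m : Int) + 1 + ((rest.take 16).length : Int))
            = 17 * (((m + 1 : Nat)) : Int) := by
          simp [List.length_take, hlen]
          ring
        rw [hofs]; exact ih (m + 1)
      · have hnil : rest.drop 16 = [] := List.drop_eq_nil_of_le (by omega)
        rw [hnil]; simp [pvAltGo, PySem.List.enumerate]
    cases halpha : PySem.Chars.isalpha c
    · rw [if_pos (by simp)]
      rw [List.map_cons, List.filter_cons,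
        if_pos (by rw [not_alpha_not_vowel c halpha]; rfl)]
      rw [List.filter_append, hkeep, List.map_append, PySem.List.map_snd_enumerate,
        List.filter_append, hdrop]
      simp [halpha]
    · rw [if_neg (by simp [hmod])]
      rw [List.filter_append, hkeep, List.map_append, PySem.List.map_snd_enumerate,
        List.filter_append, hdrop]
      simp [halpha]

-- ===== VERDICT (by name: the statement is the Claim_ definition above) =====
theorem translation_artifact_text_py_spec : Claim_equal_translation_artifact_text_py := by
  intro text _
  show _ = _
  unfold translation_artifact_text_py translation_artifact_text_py_alt
  simp only [foldl_skip_append, List.nil_append, PySem.Chars.join, intercalate_nil_left,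
    flatten_map_repl_pairs]
  have h := chunk_eq text.toList 0
  simp only [Nat.cast_zero, mul_zero] at h
  rw [h]
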